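-- pv_equiv track=rewrite | github.com/ArthuretYuan/exercise_dm | src/exercise_dm/utils/measure_false_degree.py | measure_false_degree
-- ===== SOURCE A (Python) =====
-- def measure_false_degree(pred_labels, true_labels):
--     """
--     There are 5 classes, if the predicted label is different from the true label, the error is classified as:
--     slight error: 1 class difference
--     moderate error: 2 class difference
--     severe error: 3 class difference
--     critical error: 4 class difference
--     """
--     correct_count = 0
--     incorrect_count = 0
--     false_degree = {'slight error': 0, 'moderate error': 0, 'severe error': 0, 'critical error': 0}
--     for pred_label, true_label in zip(pred_labels, true_labels):
--         if pred_label == true_label: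
--             correct_count += 1
--         else:
--             incorrect_count += 1
--             diff = abs(pred_label - true_label)
--             if diff == 1:
--                 false_degree['slight error'] += 1
--             elif diff == 2:
--                 false_degree['moderate error'] += 1
--             elif diff == 3:
--                 false_degree['severe error'] += 1
--             elif diff == 4:
--                 false_degree['critical error'] += 1
--     return correct_count, incorrect_count, false_degree
-- ===== SOURCE B (Python) =====
-- def measure_false_degree(pred_labels, true_labels):
--     diffs = [abs(p - t) for p, t in zip(pred_labels, true_labels)]
--     correct_count = diffs.count(0)
--     incorrect_count = len(diffs) - correct_count
--     false_degree = {name: diffs.count(d) for d, name in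
--                     ((1, 'slight error'), (2, 'moderate error'),
--                      (3, 'severe error'), (4, 'critical error'))}
--     return correct_count, incorrect_count, false_degree
-- ===== Notes on version B (the rewrite author's own statement) =====
-- stated objective: simpler
-- what changed: Replaces A's single pass with a per-element if/elif accumulator chain and an in-place dict of four counters by first tabulating the list of absolute differences, then reading correct_count as its count of 0, incorrect_count as length minus that, and the error-degree dict as counts of 1..4 via a comprehension.
import Mathlib
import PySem

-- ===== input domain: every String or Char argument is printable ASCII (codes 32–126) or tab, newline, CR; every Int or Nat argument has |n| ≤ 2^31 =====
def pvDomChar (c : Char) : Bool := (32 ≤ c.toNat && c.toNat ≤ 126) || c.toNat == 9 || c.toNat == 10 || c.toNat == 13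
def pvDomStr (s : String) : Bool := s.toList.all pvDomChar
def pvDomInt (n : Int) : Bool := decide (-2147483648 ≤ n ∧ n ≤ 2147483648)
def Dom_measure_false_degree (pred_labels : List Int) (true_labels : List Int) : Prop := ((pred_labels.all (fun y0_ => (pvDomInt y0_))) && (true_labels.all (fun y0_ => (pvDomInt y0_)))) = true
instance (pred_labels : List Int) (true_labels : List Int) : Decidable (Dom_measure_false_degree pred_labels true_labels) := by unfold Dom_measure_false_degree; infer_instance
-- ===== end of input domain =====

-- B tabulates the list of absolute differences once and reads the three results
-- off it with counts, instead of A's per-element if/elif accumulator chain (objective: simpler).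


-- ===== PORT A =====
-- loop body of A's for-loop (one helper so the fold is named; the branches are A's, in A's order)
def pvStepA (st : Int × Int × PySem.Dict String Int) (pt : Int × Int) : Int × Int × PySem.Dict String Int :=
  let c := st.1; let i := st.2.1; let fd := st.2.2
  if pt.1 == pt.2 then (c + 1, i, fd)
  else
    let diff := |pt.1 - pt.2|
    if diff == 1 then (c, i + 1, fd.modify "slight error" 0 (· + 1))
    else if diff == 2 then (c, i + 1, fd.modify "moderate error" 0 (· + 1))
    else if diff == 3 then (c, i + 1, fd.modify "severe error" 0 (· + 1))
    else if diff == 4 then (c, i + 1, fd.modify "critical error" 0 (· + 1))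
    else (c, i + 1, fd)

def measure_false_degree (pred_labels : List Int) (true_labels : List Int) : Int × Int × (List (String × Int)) :=
  let init : Int × Int × PySem.Dict String Int :=
    (0, 0, PySem.Dict.ofList [("slight error", 0), ("moderate error", 0), ("severe error", 0), ("critical error", 0)])
  let res := (pred_labels.zip true_labels).foldl pvStepA init
  (res.1, res.2.1, res.2.2.items)

-- ===== PORT B =====
def measure_false_degree_alt (pred_labels : List Int) (true_labels : List Int) : Int × Int × (List (String × Int)) :=
  let diffs := (pred_labels.zip true_labels).map (fun pt => |pt.1 - pt.2|)
  let correct_count : Int := PySem.List.count diffs 0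
  let incorrect_count : Int := (diffs.length : Int) - correct_count
  let false_degree := [((1 : Int), "slight error"), (2, "moderate error"), (3, "severe error"), (4, "critical error")].map
    (fun dn => (dn.2, (PySem.List.count diffs dn.1 : Int)))
  (correct_count, incorrect_count, false_degree)

-- ===== PRECONDITION & SPEC =====
def Spec_measure_false_degree (pred_labels : List Int) (true_labels : List Int) (out : Int × Int × (List (String × Int))) : Prop := out = measure_false_degree_alt pred_labels true_labels
instance (pred_labels : List Int) (true_labels : List Int) (out : Int × Int × (List (String × Int))) : Decidable (Spec_measure_false_degree pred_labels true_labels out) := by unfold Spec_measure_false_degree; infer_instance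

-- ===== CLAIM (what is proved, stated in full; the proofs are below) =====
def Claim_equal_measure_false_degree : Prop := ∀ (pred_labels : List Int) (true_labels : List Int), Dom_measure_false_degree pred_labels true_labels → Spec_measure_false_degree pred_labels true_labels (measure_false_degree pred_labels true_labels)

-- ===== LEMMAS AND PROOFS =====

/-- count of `d` among the absolute differences of a pair list, as an `Int`. -/
def pvCnt (d : Int) (l : List (Int × Int)) : Int :=
  ((l.map (fun pt => |pt.1 - pt.2|)).count d : Int)

theorem pvCnt_cons (d : Int) (pt : Int × Int) (l : List (Int × Int)) :
    pvCnt d (pt :: l) = pvCnt d l + (if |pt.1 - pt.2| = d then 1 else 0) := by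
  unfold pvCnt
  rw [List.map_cons, List.count_cons]
  by_cases h : |pt.1 - pt.2| = d <;> simp [h]

theorem pvLoop_inv (l : List (Int × Int)) (c i s m v r : Int) :
    (l.foldl pvStepA
      (c, i, PySem.Dict.mk [("slight error", s), ("moderate error", m), ("severe error", v), ("critical error", r)]))
    = (c + pvCnt 0 l, i + ((l.length : Int) - pvCnt 0 l),
       PySem.Dict.mk [("slight error", s + pvCnt 1 l), ("moderate error", m + pvCnt 2 l),
                      ("severe error", v + pvCnt 3 l), ("critical error", r + pvCnt 4 l)]) := by
  induction l generalizing c i s m v r with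
  | nil => simp [pvCnt]
  | cons pt l ih =>
    rw [List.foldl_cons]
    by_cases h0 : pt.1 = pt.2
    · have hd : |pt.1 - pt.2| = 0 := by simp [h0]
      have hstep : pvStepA (c, i, PySem.Dict.mk [("slight error", s), ("moderate error", m), ("severe error", v), ("critical error", r)]) pt
          = (c + 1, i, PySem.Dict.mk [("slight error", s), ("moderate error", m), ("severe error", v), ("critical error", r)]) := by
        simp [pvStepA, h0]
      rw [hstep, ih]
      simp [pvCnt_cons, Prod.ext_iff, hd]
      omega
    · have hne : (pt.1 == pt.2) = false := by simp [h0]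
      have hd0 : ¬ |pt.1 - pt.2| = 0 := by simp [sub_eq_zero]; exact h0
      by_cases h1 : |pt.1 - pt.2| = 1
      · have hstep : pvStepA (c, i, PySem.Dict.mk [("slight error", s), ("moderate error", m), ("severe error", v), ("critical error", r)]) pt
            = (c, i + 1, PySem.Dict.mk [("slight error", s + 1), ("moderate error", m), ("severe error", v), ("critical error", r)]) := by
          simp only [pvStepA, hne, Bool.false_eq_true, if_false, h1]
          rfl
        rw [hstep, ih]
        simp [pvCnt_cons, Prod.ext_iff, PySem.Dict.ext_iff, h1]
        omega
      · by_cases h2 : |pt.1 - pt.2| = 2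
        · have hstep : pvStepA (c, i, PySem.Dict.mk [("slight error", s), ("moderate error", m), ("severe error", v), ("critical error", r)]) pt
              = (c, i + 1, PySem.Dict.mk [("slight error", s), ("moderate error", m + 1), ("severe error", v), ("critical error", r)]) := by
            simp only [pvStepA, hne, Bool.false_eq_true, if_false, h2]
            rfl
          rw [hstep, ih]
          simp [pvCnt_cons, Prod.ext_iff, PySem.Dict.ext_iff, h2]
          omega
        · by_cases h3 : |pt.1 - pt.2| = 3
          · have hstep : pvStepA (c, i, PySem.Dict.mk [("slight error", s), ("moderate error", m), ("severe error", v), ("critical error", r)]) pt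
                = (c, i + 1, PySem.Dict.mk [("slight error", s), ("moderate error", m), ("severe error", v + 1), ("critical error", r)]) := by
              simp only [pvStepA, hne, Bool.false_eq_true, if_false, h3]
              rfl
            rw [hstep, ih]
            simp [pvCnt_cons, Prod.ext_iff, PySem.Dict.ext_iff, h3]
            omega
          · by_cases h4 : |pt.1 - pt.2| = 4
            · have hstep : pvStepA (c, i, PySem.Dict.mk [("slight error", s), ("moderate error", m), ("severe error", v), ("critical error", r)]) pt
                  = (c, i + 1, PySem.Dict.mk [("slight error", s), ("moderate error", m), ("severe error", v), ("critical error", r + 1)]) := by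
                simp only [pvStepA, hne, Bool.false_eq_true, if_false, h4]
                rfl
              rw [hstep, ih]
              simp [pvCnt_cons, Prod.ext_iff, PySem.Dict.ext_iff, h4]
              omega
            · have hstep : pvStepA (c, i, PySem.Dict.mk [("slight error", s), ("moderate error", m), ("severe error", v), ("critical error", r)]) pt
                  = (c, i + 1, PySem.Dict.mk [("slight error", s), ("moderate error", m), ("severe error", v), ("critical error", r)]) := by
                simp [pvStepA, hne, h1, h2, h3, h4]
              rw [hstep, ih]
              simp [pvCnt_cons, Prod.ext_iff, hd0, h1, h2, h3, h4]
              omega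

-- ===== VERDICT (by name: the statement is the Claim_ definition above) =====
theorem measure_false_degree_spec : Claim_equal_measure_false_degree := by
  intro pred_labels true_labels _
  unfold Spec_measure_false_degree measure_false_degree measure_false_degree_alt
  have h := pvLoop_inv (pred_labels.zip true_labels) 0 0 0 0 0 0
  simp only [show (PySem.Dict.ofList [("slight error", (0:Int)), ("moderate error", 0), ("severe error", 0), ("critical error", 0)]) = PySem.Dict.mk [("slight error", 0), ("moderate error", 0), ("severe error", 0), ("critical error", 0)] from rfl]
  rw [h]
  simp [pvCnt, PySem.List.count_eq]
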